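-- pv_equiv track=rewrite | github.com/Zachary-Mabry/Ziscord-Bot | memetype.py | meme
-- ===== SOURCE A (Python) =====
-- def meme(s):
--     count = 0
--     outl = []
--     out = ""
--     numdict = {'1':'one', '2':'two', '3':'three', '4':'four', '5':'five', '6':'six', '7':'seven', '8':'eight',
--                '9':'nine', '0':'zero'}
--     while count < len(s):
--         if not s[count].isalnum():
--             if s[count] == " ":
--                 out += "    "
--             else:
--                 out += s[count]
--             count += 1
--         else:
--             if numdict.__contains__(s[count]):
--                 out += ":" + numdict[s[count]] + ": "
--                 count += 1
--             else:
--                 out += ":regional_indicator_" + s[count].lower() + ": "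
--                 count += 1
--         if len(out) > 1970:
--             outl.append(out)
--             out = ""
--     outl.append(out)
--     return outl
-- ===== SOURCE B (Python) =====
-- _WORDS = {'0': 'zero', '1': 'one', '2': 'two', '3': 'three', '4': 'four',
--           '5': 'five', '6': 'six', '7': 'seven', '8': 'eight', '9': 'nine'}
--
-- def _tok(c):
--     if c == ' ':
--         return '    '
--     if not c.isalnum():
--         return c
--     w = _WORDS.get(c)
--     if w is not None:
--         return ':' + w + ': '
--     return ':regional_indicator_' + c.lower() + ': '
--
-- def meme(s):
--     toks = [_tok(c) for c in s]
--     # prefix sums of token lengths: P[k] = total length of toks[:k]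
--     P = [0]
--     for t in toks:
--         P.append(P[-1] + len(t))
--     n = len(toks)
--     outl = []
--     start = 0
--     while start < n:
--         # first j in (start, n] with P[j] > P[start] + 1970, by binary search
--         target = P[start] + 1970
--         lo, hi = start + 1, n + 1
--         while lo < hi:
--             mid = (lo + hi) // 2
--             if P[mid] > target:
--                 hi = mid
--             else:
--                 lo = mid + 1
--         j = lo
--         if j > n:
--             break
--         outl.append(''.join(toks[start:j]))
--         start = j
--     outl.append(''.join(toks[start:]))
--     return outl
-- ===== Notes on version B (the rewrite author's own statement) =====
-- stated objective: alternative
-- what changed: B precomputes the per-character emoji tokens and the prefix sums of their lengths, then locates each chunk boundary by binary search over the prefix-sum array and emits joined token slices, instead of A's character-by-character accumulate-and-flush while loop.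
import Mathlib
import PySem

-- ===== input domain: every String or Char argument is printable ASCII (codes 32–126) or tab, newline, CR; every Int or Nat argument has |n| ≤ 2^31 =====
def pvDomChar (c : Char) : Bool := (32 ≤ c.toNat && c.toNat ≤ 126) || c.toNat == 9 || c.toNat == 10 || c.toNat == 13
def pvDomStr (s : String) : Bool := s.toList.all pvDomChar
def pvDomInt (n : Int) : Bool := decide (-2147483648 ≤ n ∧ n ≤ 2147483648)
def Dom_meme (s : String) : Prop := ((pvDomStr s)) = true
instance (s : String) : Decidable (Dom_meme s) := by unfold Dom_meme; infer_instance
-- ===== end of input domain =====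

-- B maps characters to tokens once, builds prefix sums of token lengths, and finds each
-- chunk boundary by binary search over the prefix sums, instead of A's char-by-char
-- accumulate-and-flush loop; objective: alternative algorithm, same observable result.

-- ===== PORT A =====
-- A's numdict, in A's insertion order
def memeNumdict : PySem.Dict Char (List Char) :=
  PySem.Dict.ofList [('1', "one".toList), ('2', "two".toList), ('3', "three".toList),
    ('4', "four".toList), ('5', "five".toList), ('6', "six".toList), ('7', "seven".toList),
    ('8', "eight".toList), ('9', "nine".toList), ('0', "zero".toList)]

-- A's while loop over the remaining characters, state = (outl, out)
def memeLoop : List Char → List (List Char) → List Char → List (List Char)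
  | [], outl, out => outl ++ [out]
  | c :: rest, outl, out =>
    let out :=
      if !(PySem.Chars.isalnum c) then
        if c = ' ' then out ++ "    ".toList else out ++ [c]
      else
        match memeNumdict.get? c with
        | some w => out ++ [':'] ++ w ++ [':', ' ']
        | none => out ++ ":regional_indicator_".toList ++ [PySem.Chars.lowerChar c] ++ [':', ' ']
    if out.length > 1970 then memeLoop rest (outl ++ [out]) []
    else memeLoop rest outl out

def meme (s : String) : List String := (memeLoop s.toList [] []).map String.ofList

-- ===== PORT B =====
def memeWords : PySem.Dict Char (List Char) :=
  PySem.Dict.ofList [('0', "zero".toList), ('1', "one".toList), ('2', "two".toList),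
    ('3', "three".toList), ('4', "four".toList), ('5', "five".toList), ('6', "six".toList),
    ('7', "seven".toList), ('8', "eight".toList), ('9', "nine".toList)]

-- Source B's _tok
def memeTok (c : Char) : List Char :=
  if c = ' ' then "    ".toList
  else if !(PySem.Chars.isalnum c) then [c]
  else
    match memeWords.get? c with
    | some w => [':'] ++ w ++ [':', ' ']
    | none => ":regional_indicator_".toList ++ [PySem.Chars.lowerChar c] ++ [':', ' ']

-- Source B: P = [0]; for t in toks: P.append(P[-1] + len(t))
-- (all indices into P used below are provably in range and nonnegative, so Nat indexing is exact)
def memePrefix (toks : List (List Char)) : List Nat :=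
  toks.foldl (fun P t => P ++ [P.getLastD 0 + t.length]) [0]

-- Source B's inner binary-search while loop (bisect_right of target in P over [lo, hi));
-- the fuel argument is only a structural totality guard: hi - lo shrinks each step,
-- so with fuel ≥ hi - lo it never runs out
def memeBS (P : List Nat) (target : Nat) : Nat → Nat → Nat → Nat
  | 0, lo, _ => lo
  | fuel + 1, lo, hi =>
    if lo < hi then
      if P.getD ((lo + hi) / 2) 0 > target then memeBS P target fuel lo ((lo + hi) / 2)
      else memeBS P target fuel ((lo + hi) / 2 + 1) hi
    else lo

-- Source B's outer while loop, state = (outl, start); toks[a:b] is (drop a).take (b-a), in range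
-- here; fuel again only a totality guard (start strictly increases each iteration)
def memeChunks (toks : List (List Char)) (P : List Nat) (n : Nat) :
    Nat → List (List Char) → Nat → List (List Char)
  | 0, outl, start => outl ++ [((toks.drop start).take (n - start)).flatten]
  | fuel + 1, outl, start =>
    if start < n then
      let target := P.getD start 0 + 1970
      let j := memeBS P target (n - start) (start + 1) (n + 1)
      if j > n then outl ++ [((toks.drop start).take (n - start)).flatten]
      else memeChunks toks P n fuel (outl ++ [((toks.drop start).take (j - start)).flatten]) j
    else outl ++ [((toks.drop start).take (n - start)).flatten]

def meme_alt (s : String) : List String :=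
  (memeChunks (s.toList.map memeTok) (memePrefix (s.toList.map memeTok))
    (s.toList.map memeTok).length (s.toList.map memeTok).length [] 0).map String.ofList

-- ===== PRECONDITION & SPEC =====
def Spec_meme (s : String) (out : List String) : Prop := out = meme_alt s
instance (s : String) (out : List String) : Decidable (Spec_meme s out) := by unfold Spec_meme; infer_instance

-- ===== CLAIM (what is proved, stated in full; the proofs are below) =====
def Claim_equal_meme : Prop := ∀ (s : String), Dom_meme s → Spec_meme s (meme s)

-- ===== LEMMAS AND PROOFS =====

-- common reference semantics: greedy chunking of the token stream
def memeGreedy : List (List Char) → List Char → List (List Char)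
  | [], out => [out]
  | t :: ts, out =>
    if (out ++ t).length > 1970 then (out ++ t) :: memeGreedy ts []
    else memeGreedy ts (out ++ t)

def memeSumLen (ts : List (List Char)) : Nat := (ts.map List.length).sum

def memeS (toks : List (List Char)) (k : Nat) : Nat := memeSumLen (toks.take k)

-- A's per-character appended piece (with the prefix out distributed out) is exactly B's token
lemma meme_tok_eq (c : Char) :
    (if !(PySem.Chars.isalnum c) then
        if c = ' ' then "    ".toList else [c]
      else
        match memeNumdict.get? c with
        | some w => [':'] ++ w ++ [':', ' ']
        | none => ":regional_indicator_".toList ++ [PySem.Chars.lowerChar c] ++ [':', ' ']) =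
    memeTok c := by
  by_cases h0 : c = '0'; · subst h0; decide
  by_cases h1 : c = '1'; · subst h1; decide
  by_cases h2 : c = '2'; · subst h2; decide
  by_cases h3 : c = '3'; · subst h3; decide
  by_cases h4 : c = '4'; · subst h4; decide
  by_cases h5 : c = '5'; · subst h5; decide
  by_cases h6 : c = '6'; · subst h6; decide
  by_cases h7 : c = '7'; · subst h7; decide
  by_cases h8 : c = '8'; · subst h8; decide
  by_cases h9 : c = '9'; · subst h9; decide
  by_cases hsp : c = ' '; · subst hsp; decide
  have hA : memeNumdict.get? c = none := by
    simp [memeNumdict, PySem.Dict.ofList, PySem.Dict.update, PySem.Dict.insert,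
      PySem.Dict.empty, PySem.Dict.get?]
    exact ⟨fun h => h1 h.symm, fun h => h2 h.symm, fun h => h3 h.symm, fun h => h4 h.symm,
      fun h => h5 h.symm, fun h => h6 h.symm, fun h => h7 h.symm, fun h => h8 h.symm,
      fun h => h9 h.symm, fun h => h0 h.symm⟩
  have hB : memeWords.get? c = none := by
    simp [memeWords, PySem.Dict.ofList, PySem.Dict.update, PySem.Dict.insert,
      PySem.Dict.empty, PySem.Dict.get?]
    exact ⟨fun h => h0 h.symm, fun h => h1 h.symm, fun h => h2 h.symm, fun h => h3 h.symm,
      fun h => h4 h.symm, fun h => h5 h.symm, fun h => h6 h.symm, fun h => h7 h.symm,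
      fun h => h8 h.symm, fun h => h9 h.symm⟩
  simp [memeTok, hA, hB, hsp]

-- the same with an arbitrary accumulated prefix out in front
lemma meme_push_eq (out : List Char) (c : Char) :
    (if !(PySem.Chars.isalnum c) then
        if c = ' ' then out ++ "    ".toList else out ++ [c]
      else
        match memeNumdict.get? c with
        | some w => out ++ [':'] ++ w ++ [':', ' ']
        | none => out ++ ":regional_indicator_".toList ++ [PySem.Chars.lowerChar c] ++ [':', ' ']) =
    out ++ memeTok c := by
  rw [← meme_tok_eq c]
  by_cases h : (!PySem.Chars.isalnum c) = true
  · by_cases hs : c = ' ' <;>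
      simp [h, hs, show PySem.Chars.isalnum ' ' = false from by decide]
  · cases memeNumdict.get? c <;> simp [h]

-- A's loop equals the greedy chunking of the mapped tokens
lemma meme_loop_eq_greedy (cs : List Char) :
    ∀ (outl : List (List Char)) (out : List Char),
      memeLoop cs outl out = outl ++ memeGreedy (cs.map memeTok) out := by
  induction cs with
  | nil => intro outl out; simp [memeLoop, memeGreedy]
  | cons c rest ih =>
    intro outl out
    rw [memeLoop]
    simp only [meme_push_eq out c, List.map_cons, memeGreedy]
    split_ifs with h <;> simp [ih]

-- characterisation of Source B's prefix-sum list
def memeScan (c : Nat) : List (List Char) → List Nat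
  | [] => []
  | t :: ts => (c + t.length) :: memeScan (c + t.length) ts

lemma meme_foldl_prefix (ts : List (List Char)) :
    ∀ (P0 : List Nat) (c : Nat), P0 ≠ [] → P0.getLastD 0 = c →
      ts.foldl (fun P t => P ++ [P.getLastD 0 + t.length]) P0 = P0 ++ memeScan c ts := by
  induction ts with
  | nil => intro P0 c _ _; simp [memeScan]
  | cons t ts ih =>
    intro P0 c hne hl
    simp only [List.foldl_cons, memeScan]
    rw [ih (P0 ++ [P0.getLastD 0 + t.length]) (c + t.length) (by simp)
      (by rw [List.getLastD_concat, hl]), hl]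
    simp

lemma memePrefix_eq (toks : List (List Char)) :
    memePrefix toks = 0 :: memeScan 0 toks := by
  unfold memePrefix
  rw [meme_foldl_prefix toks [0] 0 (by simp) (by simp)]
  rfl

lemma memeScan_getD (ts : List (List Char)) :
    ∀ (c i : Nat), i < ts.length → (memeScan c ts).getD i 0 = c + memeSumLen (ts.take (i + 1)) := by
  induction ts with
  | nil => intro c i h; simp at h
  | cons t ts ih =>
    intro c i h
    cases i with
    | zero => simp [memeScan, memeSumLen]
    | succ i =>
      simp only [memeScan, List.getD_cons_succ]
      rw [ih (c + t.length) i (by simpa using h)]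
      simp [memeSumLen, Nat.add_assoc]

lemma memePrefix_getD (toks : List (List Char)) (k : Nat) (hk : k ≤ toks.length) :
    (memePrefix toks).getD k 0 = memeS toks k := by
  rw [memePrefix_eq]
  cases k with
  | zero => simp [memeS, memeSumLen]
  | succ k =>
    simp only [List.getD_cons_succ]
    rw [memeScan_getD toks 0 k (by omega)]
    simp [memeS]

lemma memeS_split (toks : List (List Char)) (a b : Nat) (hab : a ≤ b) :
    memeS toks b = memeS toks a + memeSumLen ((toks.drop a).take (b - a)) := by
  have hb : b = a + (b - a) := by omega
  rw [hb]
  simp [memeS, memeSumLen, List.take_add]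

-- binary-search specification (fuel large enough that it never runs out)
lemma memeBS_spec (P : List Nat) (target : Nat) :
    ∀ (fuel lo hi : Nat), hi - lo ≤ fuel → lo ≤ hi →
      (∀ a b, lo ≤ a → a ≤ b → b < hi → P.getD a 0 ≤ P.getD b 0) →
      lo ≤ memeBS P target fuel lo hi ∧ memeBS P target fuel lo hi ≤ hi ∧
      (∀ k, lo ≤ k → k < memeBS P target fuel lo hi → P.getD k 0 ≤ target) ∧
      (memeBS P target fuel lo hi < hi → target < P.getD (memeBS P target fuel lo hi) 0) := by
  intro fuel
  induction fuel with
  | zero =>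
    intro lo hi hf hle mono
    simp only [memeBS]
    exact ⟨Nat.le_refl _, by omega, fun k hk hkr => by omega, fun h => by omega⟩
  | succ fuel ihf =>
    intro lo hi hf hle mono
    rw [memeBS]
    split
    · next hlt =>
      split
      · next hmid =>
        have ih := ihf lo ((lo + hi) / 2) (by omega) (by omega)
          (fun a b ha hab hb => mono a b ha hab (by omega))
        refine ⟨ih.1, by omega, ih.2.2.1, ?_⟩
        intro hr
        rcases Nat.lt_or_ge (memeBS P target fuel lo ((lo + hi) / 2)) ((lo + hi) / 2) with h | h
        · exact ih.2.2.2 h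
        · have : memeBS P target fuel lo ((lo + hi) / 2) = (lo + hi) / 2 := by
            have := ih.2.1
            omega
          rw [this]; exact hmid
      · next hmid =>
        have ih := ihf ((lo + hi) / 2 + 1) hi (by omega) (by omega)
          (fun a b ha hab hb => mono a b (by omega) hab hb)
        refine ⟨by have := ih.1; omega, ih.2.1, ?_, ih.2.2.2⟩
        intro k hk hkr
        rcases Nat.lt_or_ge k ((lo + hi) / 2 + 1) with h | h
        · calc P.getD k 0 ≤ P.getD ((lo + hi) / 2) 0 := mono k _ hk (by omega) (by omega)
            _ ≤ target := by omega
        · exact ih.2.2.1 k h hkr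
    · exact ⟨Nat.le_refl _, by omega, fun k hk hkr => by omega, fun h => by omega⟩

-- greedy: no flush ever happens
lemma memeGreedy_no_flush (ts : List (List Char)) :
    ∀ (out : List Char), out.length + memeSumLen ts ≤ 1970 →
      memeGreedy ts out = [out ++ ts.flatten] := by
  induction ts with
  | nil => intro out h; simp [memeGreedy]
  | cons t ts ih =>
    intro out h
    simp only [memeSumLen, List.map_cons, List.sum_cons] at h
    rw [memeGreedy]
    have hno : ¬ (out ++ t).length > 1970 := by simp [memeSumLen] at *; omega
    simp only [hno, if_false]
    rw [ih (out ++ t) (by simp [memeSumLen] at *; omega)]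
    simp

-- greedy: the first flush happens after exactly j tokens
lemma memeGreedy_flush (ts : List (List Char)) :
    ∀ (out : List Char) (j : Nat), 1 ≤ j → j ≤ ts.length →
      1970 < out.length + memeSumLen (ts.take j) →
      (∀ k, k < j → out.length + memeSumLen (ts.take k) ≤ 1970) →
      memeGreedy ts out = (out ++ (ts.take j).flatten) :: memeGreedy (ts.drop j) [] := by
  induction ts with
  | nil => intro out j h1 h2 _ _; simp at h2; omega
  | cons t ts ih =>
    intro out j h1 h2 hbig hsmall
    cases j with
    | zero => omega
    | succ m =>
      rw [memeGreedy]
      cases m with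
      | zero =>
        have hyes : (out ++ t).length > 1970 := by
          simp only [List.take_succ_cons, List.take_zero] at hbig
          simp [memeSumLen] at hbig ⊢; omega
        rw [if_pos hyes]
        simp
      | succ m =>
        have hno : ¬ (out ++ t).length > 1970 := by
          have := hsmall 1 (by omega)
          simp [memeSumLen] at this ⊢; omega
        simp only [hno, if_false]
        rw [ih (out ++ t) (m + 1) (by omega) (by simpa using h2)
          (by simp only [List.take_succ_cons] at hbig; simp [memeSumLen] at hbig ⊢; omega)
          (by
            intro k hk
            have := hsmall (k + 1) (by omega)
            simp only [List.take_succ_cons] at this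
            simp [memeSumLen] at this ⊢; omega)]
        simp

-- B's outer loop equals the greedy chunking of the token suffix
lemma memeChunks_eq_greedy (toks : List (List Char)) :
    ∀ (fuel start : Nat) (outl : List (List Char)), toks.length - start ≤ fuel →
      memeChunks toks (memePrefix toks) toks.length fuel outl start =
        outl ++ memeGreedy (toks.drop start) [] := by
  intro fuel
  induction fuel with
  | zero =>
    intro start outl hf
    rw [memeChunks]
    rw [List.drop_eq_nil_of_le (by omega)]
    simp [memeGreedy]
  | succ fuel ih =>
    intro start outl hf
    by_cases hlt : start < toks.length
    · set n := toks.length with hn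
      have htarget : (memePrefix toks).getD start 0 = memeS toks start :=
        memePrefix_getD toks start (by omega)
      have mono : ∀ a b, start + 1 ≤ a → a ≤ b → b < n + 1 →
          (memePrefix toks).getD a 0 ≤ (memePrefix toks).getD b 0 := by
        intro a b ha hab hb
        rw [memePrefix_getD toks a (by omega), memePrefix_getD toks b (by omega)]
        have := memeS_split toks a b hab
        omega
      have hspec := memeBS_spec (memePrefix toks) (memeS toks start + 1970)
        (n - start) (start + 1) (n + 1) (by omega) (by omega) mono
      rw [memeChunks]
      simp only [hlt, if_true, htarget]
      set j := memeBS (memePrefix toks) (memeS toks start + 1970) (n - start) (start + 1) (n + 1) with hj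
      by_cases hjn : j > n
      · -- j = n + 1 : no flush at all
        simp only [hjn, if_true]
        have hall : memeSumLen (toks.drop start) ≤ 1970 := by
          have hsplit := memeS_split toks start n (by omega)
          have htk : (toks.drop start).take (n - start) = toks.drop start := by
            apply List.take_of_length_le; simp [hn]
          rw [htk] at hsplit
          by_cases hsn : start + 1 ≤ n
          · have := hspec.2.2.1 n hsn (by omega)
            rw [memePrefix_getD toks n (by omega)] at this
            omega
          · omega
        rw [memeGreedy_no_flush (toks.drop start) [] (by simpa using hall)]
        have htk : (toks.drop start).take (n - start) = toks.drop start := by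
          apply List.take_of_length_le; simp [hn]
        simp [htk]
      · -- flush after j - start tokens
        simp only [hjn, if_false]
        have hjle : j ≤ n := by omega
        have hjge : start + 1 ≤ j := hspec.1
        have hSj : memeS toks start + 1970 < memeS toks j := by
          have := hspec.2.2.2 (by omega)
          rw [memePrefix_getD toks j (by omega)] at this
          exact this
        have hflush := memeGreedy_flush (toks.drop start) [] (j - start)
          (by omega) (by simp only [List.length_drop]; omega)
          (by
            have hsp := memeS_split toks start j (by omega)
            simp only [List.length_nil, Nat.zero_add]
            omega)
          (by
            intro k hk
            cases k with
            | zero => simp [memeSumLen]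
            | succ k =>
              have hidx : start + 1 ≤ start + (k + 1) := by omega
              have hlt2 : start + (k + 1) < j := by omega
              have hPk := hspec.2.2.1 (start + (k + 1)) hidx hlt2
              rw [memePrefix_getD toks (start + (k + 1)) (by omega)] at hPk
              have hsp := memeS_split toks start (start + (k + 1)) (by omega)
              have hred : start + (k + 1) - start = k + 1 := by omega
              rw [hred] at hsp
              simp only [List.length_nil, Nat.zero_add]
              omega)
        rw [ih j (outl ++ [((toks.drop start).take (j - start)).flatten]) (by omega)]
        rw [List.drop_drop] at hflush
        have hjs : start + (j - start) = j := by omega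
        rw [hjs] at hflush
        rw [hflush]
        simp
    · rw [memeChunks]
      simp only [hlt, if_false]
      rw [List.drop_eq_nil_of_le (by omega)]
      simp [memeGreedy]

-- ===== VERDICT (by name: the statement is the Claim_ definition above) =====
theorem meme_spec : Claim_equal_meme := by
  intro s _
  unfold Spec_meme meme meme_alt
  rw [meme_loop_eq_greedy, memeChunks_eq_greedy _ (s.toList.map memeTok).length 0 [] (by omega)]
  simp
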